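-- pv_equiv track=rewrite | github.com/laknath/codeforces | vacation.py | greedy_best_choice
-- ===== SOURCE A (Python) =====
-- def greedy_best_choice(days):
--     """Select best option in case of 3 when prev rested"""
--     if len(days) == 0:
--         return 1 # no effect or 1 or 2
--
--     cur = days[0]
--     if cur == 3:
--         cur = greedy_best_choice(days[1:])
--
--     if cur == 1:
--         return 2
--     elif cur == 2:
--         return 1
--     else:
--         return 1
-- ===== SOURCE B (Python) =====
-- def greedy_best_choice(days):
--     """Select best option in case of 3 when prev rested"""
--     k = 0
--     n = len(days)
--     while k < n and days[k] == 3: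
--         k += 1
--     if k == n:
--         # all days (possibly none) are 3s: the answer alternates with the count
--         return 1 if k % 2 == 0 else 2
--     base = 2 if days[k] == 1 else 1
--     return base if k % 2 == 0 else 3 - base
-- ===== Notes on version B (the rewrite author's own statement) =====
-- stated objective: alternative
-- what changed: Replaces the suffix recursion (each level slicing days[1:] and post-mapping the result) by a single scan that counts leading 3s and computes the answer directly from the first non-3 element and the count's parity.
import Mathlib
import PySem

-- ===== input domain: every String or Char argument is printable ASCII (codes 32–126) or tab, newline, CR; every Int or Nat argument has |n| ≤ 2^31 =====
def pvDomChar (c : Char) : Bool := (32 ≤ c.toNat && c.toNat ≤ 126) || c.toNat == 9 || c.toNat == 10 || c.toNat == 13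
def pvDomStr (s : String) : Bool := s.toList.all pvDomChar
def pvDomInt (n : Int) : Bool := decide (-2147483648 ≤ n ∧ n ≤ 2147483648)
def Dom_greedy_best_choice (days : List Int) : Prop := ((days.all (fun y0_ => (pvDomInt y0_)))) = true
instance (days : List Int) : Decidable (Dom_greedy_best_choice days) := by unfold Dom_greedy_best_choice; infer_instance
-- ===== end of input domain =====

-- B computes the same value by a different algorithm: one scan counting leading 3s plus a parity formula, instead of A's suffix recursion with per-level slicing.


-- ===== PORT A =====
-- literal transliteration of A: empty → 1; cur = days[0], if cur == 3 recurse on days[1:]; then map 1→2, 2→1, else→1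
def greedy_best_choice (days : List Int) : Int :=
  match days with
  | [] => 1
  | d :: rest =>
    let cur := if d == 3 then greedy_best_choice rest else d
    if cur == 1 then 2
    else if cur == 2 then 1
    else 1

-- ===== PORT B =====
-- strip3 returns (number of leading 3s, remaining suffix) — B's single scan
def strip3 : List Int → Nat × List Int
  | [] => (0, [])
  | d :: rest =>
    if d == 3 then
      let p := strip3 rest
      (p.1 + 1, p.2)
    else (0, d :: rest)

def greedy_best_choice_alt (days : List Int) : Int :=
  let p := strip3 days
  match p.2 with
  | [] => if p.1 % 2 == 0 then 1 else 2
  | x :: _ =>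
    let base : Int := if x == 1 then 2 else 1
    if p.1 % 2 == 0 then base else 3 - base

-- ===== PRECONDITION & SPEC =====
def Spec_greedy_best_choice (days : List Int) (out : Int) : Prop := out = greedy_best_choice_alt days
instance (days : List Int) (out : Int) : Decidable (Spec_greedy_best_choice days out) := by unfold Spec_greedy_best_choice; infer_instance

-- ===== CLAIM (what is proved, stated in full; the proofs are below) =====
def Claim_equal_greedy_best_choice : Prop := ∀ (days : List Int), Dom_greedy_best_choice days → Spec_greedy_best_choice days (greedy_best_choice days)

-- ===== LEMMAS AND PROOFS =====

-- B's value is always 1 or 2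
theorem alt_one_or_two (days : List Int) :
    greedy_best_choice_alt days = 1 ∨ greedy_best_choice_alt days = 2 := by
  unfold greedy_best_choice_alt
  rcases h : (strip3 days).2 with _ | ⟨x, r⟩ <;> simp only [h] <;> split_ifs <;> norm_num

theorem strip3_cons_three (rest : List Int) :
    strip3 (3 :: rest) = ((strip3 rest).1 + 1, (strip3 rest).2) := by
  simp [strip3]

-- prepending a 3 flips B's value between 1 and 2
theorem alt_cons_three (rest : List Int) :
    greedy_best_choice_alt (3 :: rest) = 3 - greedy_best_choice_alt rest := by
  unfold greedy_best_choice_alt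
  rw [strip3_cons_three]
  rcases Nat.mod_two_eq_zero_or_one (strip3 rest).1 with h0 | h0 <;>
    have h1 : ((strip3 rest).1 + 1) % 2 = 1 - (strip3 rest).1 % 2 := by omega
  all_goals rcases h : (strip3 rest).2 with _ | ⟨x, r⟩ <;>
    simp only [h, h0, h1] <;> norm_num

theorem a_eq_alt (days : List Int) : greedy_best_choice days = greedy_best_choice_alt days := by
  induction days with
  | nil => simp [greedy_best_choice, greedy_best_choice_alt, strip3]
  | cons d rest ih =>
    by_cases hd : d = 3
    · subst hd
      rw [alt_cons_three]
      unfold greedy_best_choice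
      rw [ih]
      rcases alt_one_or_two rest with h | h <;> simp [h]
    · unfold greedy_best_choice greedy_best_choice_alt strip3
      simp only [hd, beq_iff_eq, if_false]
      split_ifs <;> simp_all

-- ===== VERDICT (by name: the statement is the Claim_ definition above) =====
theorem greedy_best_choice_spec : Claim_equal_greedy_best_choice := by
  intro days _
  unfold Spec_greedy_best_choice
  exact a_eq_alt days
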